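-- pv_equiv track=rewrite | github.com/sccn/eegprep | docs/source/extensions/docstring_validator.py | check_docstring_format
-- ===== SOURCE A (Python) =====
-- def check_docstring_format(docstring: str, name: str) -> list:
--     """
--     Check docstring for common NumPy format issues.
--
--     Parameters
--     ----------
--     docstring : str
--         The docstring to check
--     name : str
--         Name of the object being checked
--
--     Returns
--     -------
--     list
--         List of issues found
--     """
--     issues = []
--
--     if not docstring:
--         return issues
--
--     lines = docstring.split('\n')
--
--     # Check 1: Section headers should be followed by a line of dashes
--     section_headers = ['Parameters', 'Returns', 'Yields', 'Raises', 'Examples', 'Notes', 'References']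
--
--     for i, line in enumerate(lines):
--         stripped = line.strip()
--
--         # Check if this is a section header
--         if stripped in section_headers:
--             # Next line should contain dashes
--             if i + 1 < len(lines):
--                 next_line = lines[i + 1]
--                 if not next_line.strip() or not all(c == '-' for c in next_line.strip()):
--                     issues.append(f"Section '{stripped}' at line {i+1} should be followed by a line of dashes")
--             else:
--                 issues.append(f"Section '{stripped}' at line {i+1} is at end of docstring")
--
--         # Check 2: Parameter descriptions should not be over-indented
--         if i > 0:
--             # Find if we're in Parameters section
--             for j in range(max(0, i-10), i):
--                 if lines[j].strip() == 'Parameters':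
--                     # Check indentation of parameter lines
--                     if ':' in stripped and not stripped.startswith('    '):
--                         # Parameter definition should have standard indentation
--                         if line.startswith('        '):  # 8 spaces is too much
--                             issues.append(f"Parameter definition at line {i+1} has excessive indentation (should be 4 spaces)")
--                     break
--
--     # Check 3: Return section should have proper format
--     in_returns = False
--     for i, line in enumerate(lines):
--         if line.strip() == 'Returns':
--             in_returns = True
--             # Check next 10 lines for proper format
--             for j in range(i+2, min(i+12, len(lines))):
--                 l = lines[j]
--                 if l.strip() and not l.startswith('    '):
--                     in_returns = False
--                     break
--                 # Should have type name, then description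
--                 if ':' in l and l.startswith('    ') and not l.startswith('        '):
--                     # This looks like a return item, check if next line is description
--                     if j + 1 < len(lines):
--                         next_l = lines[j+1]
--                         if next_l.strip() and not next_l.startswith('        '):
--                             issues.append(f"Return description at line {j+2} should be indented more than return name")
--
--     return issues
-- ===== SOURCE B (Python) =====
-- def check_docstring_format(docstring: str, name: str) -> list:
--     """Different decomposition: one forward pass with a countdown counter
--     (reset to 10 after each 'Parameters' header) replacing A's per-line
--     10-line backward scan, and the Returns lookahead done as a take-while
--     window followed by a filter instead of a scan with an inline break."""
--     if not docstring:
--         return []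
--     lines = docstring.split('\n')
--     n = len(lines)
--     headers = ('Parameters', 'Returns', 'Yields', 'Raises', 'Examples', 'Notes', 'References')
--
--     def dash_ok(s):
--         return bool(s) and s.count('-') == len(s)
--
--     issues = []
--     rets = []
--     w = 0  # countdown: >0 iff a 'Parameters' header occurred within the last 10 lines
--     for i, line in enumerate(lines):
--         s = line.strip()
--         if s in headers:
--             if i + 1 == n:
--                 issues.append(f"Section '{s}' at line {i+1} is at end of docstring")
--             elif not dash_ok(lines[i+1].strip()):
--                 issues.append(f"Section '{s}' at line {i+1} should be followed by a line of dashes")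
--         if w > 0 and ':' in s and not s.startswith('    ') and line.startswith('        '):
--             issues.append(f"Parameter definition at line {i+1} has excessive indentation (should be 4 spaces)")
--         w = 10 if s == 'Parameters' else (w - 1 if w else 0)
--         if s == 'Returns':
--             # take the window up to (not including) the first outdented non-blank line
--             body = []
--             for j in range(i + 2, min(i + 12, n)):
--                 if lines[j].strip() and not lines[j].startswith('    '):
--                     break
--                 body.append(j)
--             for j in body:
--                 l = lines[j]
--                 if ':' in l and l.startswith('    ') and not l.startswith('        ') and j + 1 < n:
--                     nl = lines[j + 1]
--                     if nl.strip() and not nl.startswith('        '):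
--                         rets.append(f"Return description at line {j+2} should be indented more than return name")
--     return issues + rets
-- ===== Notes on version B (the rewrite author's own statement) =====
-- stated objective: alternative
-- what changed: A single recursive forward pass with a countdown counter (reset to 10 at each 'Parameters' header) replaces A's per-line 10-line backward scan for Check 2, and the Returns lookahead becomes a take-while window followed by a filter instead of A's scan with an inline break; Check 1's branches are reordered and its all-dashes test done by character count.
import Mathlib
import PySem

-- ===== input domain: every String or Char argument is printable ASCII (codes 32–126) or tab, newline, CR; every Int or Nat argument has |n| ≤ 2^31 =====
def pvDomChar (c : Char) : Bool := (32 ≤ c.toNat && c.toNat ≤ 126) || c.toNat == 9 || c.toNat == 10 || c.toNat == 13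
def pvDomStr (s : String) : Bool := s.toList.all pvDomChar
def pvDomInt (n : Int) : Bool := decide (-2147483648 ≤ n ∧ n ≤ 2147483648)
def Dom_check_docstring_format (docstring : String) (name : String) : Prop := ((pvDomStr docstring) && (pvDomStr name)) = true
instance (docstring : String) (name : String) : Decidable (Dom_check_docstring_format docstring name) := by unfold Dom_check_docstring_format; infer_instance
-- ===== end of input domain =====

-- B replaces A's per-line 10-line backward scan with a countdown counter reset after each
-- 'Parameters' header, and A's Returns scan-with-break with a take-while window plus filter,
-- all in one recursive forward pass.

-- ===== PORT A =====

def pvHdrsA : List String :=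
  ["Parameters", "Returns", "Yields", "Raises", "Examples", "Notes", "References"]

-- A's inner back-scan: 'for j in range(max(0, i-10), i): if lines[j].strip() == "Parameters": …; break'
def pvScanParamsA (lines : List String) (stripped line : String) (i : Int) : List Int → List String
  | [] => []
  | j :: rest =>
    if PySem.Str.strip (PySem.List.pyGetD lines j "") = "Parameters" then
      if PySem.Str.isIn ":" stripped && !(PySem.Str.startswith stripped "    ") then
        if PySem.Str.startswith line "        " then
          ["Parameter definition at line " ++ PySem.Int.toStr (i + 1) ++ " has excessive indentation (should be 4 spaces)"]
        else []
      else []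
    else pvScanParamsA lines stripped line i rest

-- A's Check-3 inner loop over range(i+2, min(i+12, len(lines))) with its break
-- (A's 'in_returns' flag is write-only in the Python — it never affects the output — so it is not carried)
def pvRetScanA (lines : List String) : List Int → List String
  | [] => []
  | j :: rest =>
    if (PySem.Str.strip (PySem.List.pyGetD lines j "") != "") && !(PySem.Str.startswith (PySem.List.pyGetD lines j "") "    ") then
      []
    else
      (if PySem.Str.isIn ":" (PySem.List.pyGetD lines j "") && PySem.Str.startswith (PySem.List.pyGetD lines j "") "    " && !(PySem.Str.startswith (PySem.List.pyGetD lines j "") "        ") then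
        if j + 1 < PySem.List.len lines then
          if (PySem.Str.strip (PySem.List.pyGetD lines (j + 1) "") != "") && !(PySem.Str.startswith (PySem.List.pyGetD lines (j + 1) "") "        ") then
            ["Return description at line " ++ PySem.Int.toStr (j + 2) ++ " should be indented more than return name"]
          else []
        else []
      else []) ++ pvRetScanA lines rest

-- A's Check 1 (section header followed by dashes)
def pvA1 (lines : List String) (issues : List String) (p : Int × String) : List String :=
  if PySem.Str.strip p.2 ∈ pvHdrsA then
    if p.1 + 1 < PySem.List.len lines then
      if PySem.Str.strip (PySem.List.pyGetD lines (p.1 + 1) "") = "" ∨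
         ¬ (((PySem.Str.strip (PySem.List.pyGetD lines (p.1 + 1) "")).toList.all fun c => c == '-') = true) then
        issues ++ ["Section '" ++ PySem.Str.strip p.2 ++ "' at line " ++ PySem.Int.toStr (p.1 + 1) ++ " should be followed by a line of dashes"]
      else issues
    else issues ++ ["Section '" ++ PySem.Str.strip p.2 ++ "' at line " ++ PySem.Int.toStr (p.1 + 1) ++ " is at end of docstring"]
  else issues

-- one step of A's first loop (Check 1 then Check 2)
def pvStepA12 (lines : List String) (issues : List String) (p : Int × String) : List String :=
  if 0 < p.1 then
    pvA1 lines issues p ++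
      pvScanParamsA lines (PySem.Str.strip p.2) p.2 p.1 (PySem.List.pyRange (max 0 (p.1 - 10)) p.1 1)
  else pvA1 lines issues p

-- one step of A's second loop (Check 3)
def pvStepA3 (lines : List String) (issues : List String) (p : Int × String) : List String :=
  if PySem.Str.strip p.2 = "Returns" then
    issues ++ pvRetScanA lines (PySem.List.pyRange (p.1 + 2) (min (p.1 + 12) (PySem.List.len lines)) 1)
  else issues

def check_docstring_format (docstring : String) (name : String) : List String :=
  if docstring = "" then []
  else
    (PySem.List.enumerate ((PySem.Str.split? docstring "\n").getD [])).foldl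
      (pvStepA3 ((PySem.Str.split? docstring "\n").getD []))
      ((PySem.List.enumerate ((PySem.Str.split? docstring "\n").getD [])).foldl
        (pvStepA12 ((PySem.Str.split? docstring "\n").getD [])) [])

-- ===== PORT B =====

-- Source B's dash_ok: nonempty and every character is a dash (count == length)
def pvDashOk (s : String) : Bool :=
  (s != "") && (s.toList.count '-' == s.toList.length)

-- Source B's Returns window: take-while up to the first outdented non-blank line, then filter
def pvRetB (lines : List String) (n i : Int) : List String :=
  ((PySem.List.pyRange (i + 2) (min (i + 12) n) 1).takeWhile
      (fun j => !((PySem.Str.strip (PySem.List.pyGetD lines j "") != "") &&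
                  !(PySem.Str.startswith (PySem.List.pyGetD lines j "") "    ")))).flatMap
    (fun j =>
      if PySem.Str.isIn ":" (PySem.List.pyGetD lines j "") &&
         PySem.Str.startswith (PySem.List.pyGetD lines j "") "    " &&
         !(PySem.Str.startswith (PySem.List.pyGetD lines j "") "        ") &&
         decide (j + 1 < n) then
        if (PySem.Str.strip (PySem.List.pyGetD lines (j + 1) "") != "") &&
           !(PySem.Str.startswith (PySem.List.pyGetD lines (j + 1) "") "        ") then
          ["Return description at line " ++ PySem.Int.toStr (j + 2) ++ " should be indented more than return name"]
        else []
      else [])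

-- Source B's single forward pass; i = current index, w = countdown since the last 'Parameters'
def pvWalkB (lines : List String) (n : Int) : Int → Nat → List String → List String × List String
  | _, _, [] => ([], [])
  | i, w, line :: rest =>
    let s := PySem.Str.strip line
    let c1 : List String :=
      if s ∈ ["Parameters", "Returns", "Yields", "Raises", "Examples", "Notes", "References"] then
        if i + 1 = n then
          ["Section '" ++ s ++ "' at line " ++ PySem.Int.toStr (i + 1) ++ " is at end of docstring"]
        else if !pvDashOk (PySem.Str.strip (PySem.List.pyGetD lines (i + 1) "")) then
          ["Section '" ++ s ++ "' at line " ++ PySem.Int.toStr (i + 1) ++ " should be followed by a line of dashes"]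
        else []
      else []
    let c2 : List String :=
      if decide (0 < w) && PySem.Str.isIn ":" s && !(PySem.Str.startswith s "    ") &&
         PySem.Str.startswith line "        " then
        ["Parameter definition at line " ++ PySem.Int.toStr (i + 1) ++ " has excessive indentation (should be 4 spaces)"]
      else []
    let w' : Nat := if s = "Parameters" then 10 else w - 1
    let c3 : List String := if s = "Returns" then pvRetB lines n i else []
    let r := pvWalkB lines n (i + 1) w' rest
    (c1 ++ c2 ++ r.1, c3 ++ r.2)

def check_docstring_format_alt (docstring : String) (name : String) : List String :=
  if docstring = "" then []
  else
    let lines := (PySem.Str.split? docstring "\n").getD []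
    let r := pvWalkB lines (PySem.List.len lines) 0 0 lines
    r.1 ++ r.2

-- ===== PRECONDITION & SPEC =====
def Spec_check_docstring_format (docstring : String) (name : String) (out : List String) : Prop := out = check_docstring_format_alt docstring name
instance (docstring : String) (name : String) (out : List String) : Decidable (Spec_check_docstring_format docstring name out) := by unfold Spec_check_docstring_format; infer_instance

-- ===== CLAIM (what is proved, stated in full; the proofs are below) =====
def Claim_equal_check_docstring_format : Prop := ∀ (docstring : String) (name : String), Dom_check_docstring_format docstring name → Spec_check_docstring_format docstring name (check_docstring_format docstring name)

-- ===== LEMMAS AND PROOFS =====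

-- index of the most recent 'Parameters' line strictly before index n
def pvLp (L : List String) : Nat → Option Int
  | 0 => none
  | n + 1 => if PySem.Str.strip (L.getD n "") = "Parameters" then some (n : Int) else pvLp L n

-- the value of B's countdown w before processing line n
def pvW (L : List String) : Nat → Nat
  | 0 => 0
  | n + 1 => if PySem.Str.strip (L.getD n "") = "Parameters" then 10 else pvW L n - 1

-- per-line contributions of A, as pure functions
def pvC1A (L : List String) (p : Int × String) : List String := pvA1 L [] p
def pvC2A (L : List String) (p : Int × String) : List String :=
  if 0 < p.1 then
    pvScanParamsA L (PySem.Str.strip p.2) p.2 p.1 (PySem.List.pyRange (max 0 (p.1 - 10)) p.1 1)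
  else []
def pvC3A (L : List String) (p : Int × String) : List String :=
  if PySem.Str.strip p.2 = "Returns" then
    pvRetScanA L (PySem.List.pyRange (p.1 + 2) (min (p.1 + 12) (PySem.List.len L)) 1)
  else []

-- the body A's back-scan executes at the first 'Parameters' hit (independent of j)
def pvBodyA (stripped line : String) (i : Int) : List String :=
  if PySem.Str.isIn ":" stripped && !(PySem.Str.startswith stripped "    ") then
    if PySem.Str.startswith line "        " then
      ["Parameter definition at line " ++ PySem.Int.toStr (i + 1) ++ " has excessive indentation (should be 4 spaces)"]
    else []
  else []

lemma pvA1_eq (L : List String) (acc : List String) (p : Int × String) :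
    pvA1 L acc p = acc ++ pvC1A L p := by
  unfold pvC1A pvA1
  split_ifs <;> simp

lemma pvStepA12_eq (L : List String) (acc : List String) (p : Int × String) :
    pvStepA12 L acc p = acc ++ (pvC1A L p ++ pvC2A L p) := by
  unfold pvStepA12 pvC2A
  split_ifs <;> simp [pvA1_eq]

lemma pvStepA3_eq (L : List String) (acc : List String) (p : Int × String) :
    pvStepA3 L acc p = acc ++ pvC3A L p := by
  unfold pvStepA3 pvC3A
  split_ifs <;> simp

lemma pvScanParamsA_eq (L : List String) (s line : String) (i : Int) (r : List Int) :
    pvScanParamsA L s line i r =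
      if (r.any fun j => PySem.Str.strip (PySem.List.pyGetD L j "") == "Parameters") then
        pvBodyA s line i
      else [] := by
  induction r with
  | nil => simp [pvScanParamsA]
  | cons j rest ih =>
    by_cases h : PySem.Str.strip (PySem.List.pyGetD L j "") = "Parameters"
    · simp [pvScanParamsA, h, pvBodyA]
    · simp [pvScanParamsA, h, ih]

lemma pvLp_spec_some (L : List String) (n : Nat) (k : Int) (h : pvLp L n = some k) :
    ∃ m : Nat, k = (m : Int) ∧ m < n ∧ PySem.Str.strip (L.getD m "") = "Parameters" ∧
      ∀ t : Nat, m < t → t < n → PySem.Str.strip (L.getD t "") ≠ "Parameters" := by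
  induction n with
  | zero => simp [pvLp] at h
  | succ n ih =>
    by_cases hp : PySem.Str.strip (L.getD n "") = "Parameters"
    · unfold pvLp at h
      rw [if_pos hp] at h
      refine ⟨n, by injection h with h'; exact h'.symm, Nat.lt_succ_self n, hp, ?_⟩
      intro t ht1 ht2
      omega
    · unfold pvLp at h
      rw [if_neg hp] at h
      obtain ⟨m, hk, hmn, hPm, hmax⟩ := ih h
      refine ⟨m, hk, Nat.lt_succ_of_lt hmn, hPm, ?_⟩
      intro t ht1 ht2
      rcases Nat.lt_succ_iff_lt_or_eq.1 ht2 with h' | h'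
      · exact hmax t ht1 h'
      · subst h'; exact hp

lemma pvLp_spec_none (L : List String) (n : Nat) (h : pvLp L n = none) :
    ∀ t : Nat, t < n → PySem.Str.strip (L.getD t "") ≠ "Parameters" := by
  induction n with
  | zero => intro t ht; omega
  | succ n ih =>
    unfold pvLp at h
    by_cases hp : PySem.Str.strip (L.getD n "") = "Parameters"
    · rw [if_pos hp] at h; exact absurd h (by simp)
    · rw [if_neg hp] at h
      intro t ht
      rcases Nat.lt_succ_iff_lt_or_eq.1 ht with h' | h'
      · exact ih h t h'
      · subst h'; exact hp

-- the countdown's value, characterised through pvLp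
lemma pvW_eq (L : List String) (m : Nat) :
    (pvLp L m = none ∧ pvW L m = 0) ∨
      (∃ t : Nat, pvLp L m = some (t : Int) ∧ t < m ∧ pvW L m = 11 - (m - t)) := by
  induction m with
  | zero => exact Or.inl ⟨rfl, rfl⟩
  | succ m ih =>
    by_cases hp : PySem.Str.strip (L.getD m "") = "Parameters"
    · refine Or.inr ⟨m, ?_, Nat.lt_succ_self m, ?_⟩
      · unfold pvLp; rw [if_pos hp]
      · unfold pvW; rw [if_pos hp]; omega
    · rcases ih with ⟨h1, h2⟩ | ⟨t, h1, h2, h3⟩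
      · refine Or.inl ⟨?_, ?_⟩
        · unfold pvLp; rw [if_neg hp]; exact h1
        · unfold pvW; rw [if_neg hp, h2]
      · refine Or.inr ⟨t, ?_, Nat.lt_succ_of_lt h2, ?_⟩
        · unfold pvLp; rw [if_neg hp]; exact h1
        · unfold pvW; rw [if_neg hp, h3]; omega

-- Check 2: A's back-scan equals B's countdown test
lemma pvC2_eq (L : List String) (n : Nat) (line : String) :
    pvC2A L ((n : Int), line) =
      (if decide (0 < pvW L n) && PySem.Str.isIn ":" (PySem.Str.strip line) &&
          !(PySem.Str.startswith (PySem.Str.strip line) "    ") &&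
          PySem.Str.startswith line "        " then
        ["Parameter definition at line " ++ PySem.Int.toStr ((n : Int) + 1) ++ " has excessive indentation (should be 4 spaces)"]
      else []) := by
  rcases pvW_eq L n with ⟨hlp, hw⟩ | ⟨t, hlp, htn, hw⟩
  · have hno := pvLp_spec_none L n hlp
    have hany : ((PySem.List.pyRange (max 0 ((n : Int) - 10)) (n : Int) 1).any
        fun j => PySem.Str.strip (PySem.List.pyGetD L j "") == "Parameters") = false := by
      rw [List.any_eq_false]
      intro j hj
      rw [PySem.List.mem_pyRange_one] at hj
      have h0 : 0 ≤ j := le_trans (le_max_left 0 _) hj.1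
      obtain ⟨u, rfl⟩ : ∃ u : Nat, j = (u : Int) := ⟨j.toNat, (Int.toNat_of_nonneg h0).symm⟩
      simp only [PySem.List.pyGetD_natCast, beq_iff_eq]
      exact hno u (by exact_mod_cast hj.2)
    simp only [pvC2A]
    rw [hw]
    by_cases h0 : (0 : Int) < (n : Int)
    · rw [if_pos h0, pvScanParamsA_eq, hany]
      simp
    · rw [if_neg h0]
      simp
  · by_cases hd : n - t ≤ 10
    · have hwpos : 0 < pvW L n := by omega
      have hmem : ((t : Int)) ∈ PySem.List.pyRange (max 0 ((n : Int) - 10)) (n : Int) 1 := by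
        rw [PySem.List.mem_pyRange_one]
        constructor <;> omega
      obtain ⟨m, heq, hmn, hPm, hmax⟩ := pvLp_spec_some L n _ hlp
      have htm : t = m := by exact_mod_cast heq
      subst htm
      have hany : ((PySem.List.pyRange (max 0 ((n : Int) - 10)) (n : Int) 1).any
          fun j => PySem.Str.strip (PySem.List.pyGetD L j "") == "Parameters") = true := by
        rw [List.any_eq_true]
        refine ⟨(t : Int), hmem, ?_⟩
        simp only [PySem.List.pyGetD_natCast, beq_iff_eq]
        exact hPm
      have h0 : (0 : Int) < (n : Int) := by omega
      simp only [pvC2A]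
      rw [if_pos h0, pvScanParamsA_eq, hany, if_pos rfl, decide_eq_true hwpos]
      simp only [Bool.true_and]
      unfold pvBodyA
      cases h1 : (PySem.Str.isIn ":" (PySem.Str.strip line)) <;>
        cases h2 : (PySem.Str.startswith (PySem.Str.strip line) "    ") <;>
          cases h3 : (PySem.Str.startswith line "        ") <;> simp
    · have hw0 : pvW L n = 0 := by omega
      obtain ⟨m, heq, hmn, hPm, hmax⟩ := pvLp_spec_some L n _ hlp
      have htm : t = m := by exact_mod_cast heq
      subst htm
      have hany : ((PySem.List.pyRange (max 0 ((n : Int) - 10)) (n : Int) 1).any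
          fun j => PySem.Str.strip (PySem.List.pyGetD L j "") == "Parameters") = false := by
        rw [List.any_eq_false]
        intro j hj
        rw [PySem.List.mem_pyRange_one] at hj
        have h0 : 0 ≤ j := le_trans (le_max_left 0 _) hj.1
        obtain ⟨u, rfl⟩ : ∃ u : Nat, j = (u : Int) := ⟨j.toNat, (Int.toNat_of_nonneg h0).symm⟩
        simp only [PySem.List.pyGetD_natCast, beq_iff_eq]
        have hmax' : ∀ v : Nat, t < v → v < n → PySem.Str.strip (L.getD v "") ≠ "Parameters" := hmax
        by_cases hut : u ≤ t
        · -- u ≤ t < n - 10 ≤ j's lower bound: impossible, j ≥ n - 10 > t ≥ u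
          have : (n : Int) - 10 ≤ (u : Int) := le_trans (le_max_right 0 _) hj.1
          omega
        · exact hmax' u (by omega) (by exact_mod_cast hj.2)
      simp only [pvC2A]
      rw [hw0]
      by_cases h0 : (0 : Int) < (n : Int)
      · rw [if_pos h0, pvScanParamsA_eq, hany]
        simp
      · rw [if_neg h0]
        simp

-- the item test inside the Returns window: A's nested ifs = B's merged Bool chain
lemma pvRetItem_eq (L : List String) (j : Int) :
    (if PySem.Str.isIn ":" (PySem.List.pyGetD L j "") && PySem.Str.startswith (PySem.List.pyGetD L j "") "    " && !(PySem.Str.startswith (PySem.List.pyGetD L j "") "        ") then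
      if j + 1 < PySem.List.len L then
        if (PySem.Str.strip (PySem.List.pyGetD L (j + 1) "") != "") && !(PySem.Str.startswith (PySem.List.pyGetD L (j + 1) "") "        ") then
          ["Return description at line " ++ PySem.Int.toStr (j + 2) ++ " should be indented more than return name"]
        else []
      else []
    else []) =
    (if PySem.Str.isIn ":" (PySem.List.pyGetD L j "") && PySem.Str.startswith (PySem.List.pyGetD L j "") "    " && !(PySem.Str.startswith (PySem.List.pyGetD L j "") "        ") && decide (j + 1 < PySem.List.len L) then
      if (PySem.Str.strip (PySem.List.pyGetD L (j + 1) "") != "") && !(PySem.Str.startswith (PySem.List.pyGetD L (j + 1) "") "        ") then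
        ["Return description at line " ++ PySem.Int.toStr (j + 2) ++ " should be indented more than return name"]
      else []
    else []) := by
  by_cases hl : j + 1 < PySem.List.len L <;>
    cases hc : (PySem.Str.isIn ":" (PySem.List.pyGetD L j "") && PySem.Str.startswith (PySem.List.pyGetD L j "") "    " && !(PySem.Str.startswith (PySem.List.pyGetD L j "") "        ")) <;>
      (simp [hl]; try rfl)

-- Check 3: A's scan-with-break equals B's take-while-then-filter
lemma pvRetScan_eq (L : List String) (r : List Int) :
    pvRetScanA L r =
      (r.takeWhile (fun j => !((PySem.Str.strip (PySem.List.pyGetD L j "") != "") &&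
          !(PySem.Str.startswith (PySem.List.pyGetD L j "") "    ")))).flatMap
        (fun j =>
          if PySem.Str.isIn ":" (PySem.List.pyGetD L j "") &&
             PySem.Str.startswith (PySem.List.pyGetD L j "") "    " &&
             !(PySem.Str.startswith (PySem.List.pyGetD L j "") "        ") &&
             decide (j + 1 < PySem.List.len L) then
            if (PySem.Str.strip (PySem.List.pyGetD L (j + 1) "") != "") &&
               !(PySem.Str.startswith (PySem.List.pyGetD L (j + 1) "") "        ") then
              ["Return description at line " ++ PySem.Int.toStr (j + 2) ++ " should be indented more than return name"]
            else []
          else []) := by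
  induction r with
  | nil => simp [pvRetScanA]
  | cons j rest ih =>
    simp only [pvRetScanA, List.takeWhile_cons]
    by_cases hb : ((PySem.Str.strip (PySem.List.pyGetD L j "") != "") &&
        !(PySem.Str.startswith (PySem.List.pyGetD L j "") "    ")) = true
    · rw [hb]
      simp
    · rw [Bool.not_eq_true] at hb
      rw [hb]
      simp only [Bool.false_eq_true, if_false, Bool.not_false, if_true, List.flatMap_cons]
      rw [pvRetItem_eq, ih]

lemma pvC3_eq (L : List String) (p : Int × String) :
    pvC3A L p = (if PySem.Str.strip p.2 = "Returns" then pvRetB L (PySem.List.len L) p.1 else []) := by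
  unfold pvC3A pvRetB
  split_ifs <;> simp [pvRetScan_eq]

-- Check 1: A's branch order equals B's (using i < len) and all-dashes equals count = length
lemma pvDashOk_iff (s : String) :
    (s = "" ∨ ¬ ((s.toList.all fun c => c == '-') = true)) ↔ ((!pvDashOk s) = true) := by
  have hcount : ((s.toList.count '-' == s.toList.length) = true) ↔ ((s.toList.all fun c => c == '-') = true) := by
    rw [beq_iff_eq, List.count_eq_length, List.all_eq_true]
    constructor
    · intro h c hc; exact beq_iff_eq.2 ((h c hc).symm)
    · intro h c hc; exact (beq_iff_eq.1 (h c hc)).symm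
  unfold pvDashOk
  rw [Bool.not_eq_true', Bool.and_eq_false_iff]
  constructor
  · rintro (he | hna)
    · left; simp [he]
    · right; rw [Bool.eq_false_iff]; exact fun hc => hna (hcount.1 hc)
  · rintro (he | hcf)
    · left; simpa using he
    · right; rw [Bool.eq_false_iff] at hcf; exact fun hall => hcf (hcount.2 hall)

lemma pvC1_eq (L : List String) (m : Nat) (line : String) (hm : m < L.length) :
    pvC1A L ((m : Int), line) =
      (if PySem.Str.strip line ∈ ["Parameters", "Returns", "Yields", "Raises", "Examples", "Notes", "References"] then
        if (m : Int) + 1 = PySem.List.len L then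
          ["Section '" ++ PySem.Str.strip line ++ "' at line " ++ PySem.Int.toStr ((m : Int) + 1) ++ " is at end of docstring"]
        else if !pvDashOk (PySem.Str.strip (PySem.List.pyGetD L ((m : Int) + 1) "")) then
          ["Section '" ++ PySem.Str.strip line ++ "' at line " ++ PySem.Int.toStr ((m : Int) + 1) ++ " should be followed by a line of dashes"]
        else []
      else []) := by
  have hlen : PySem.List.len L = (L.length : Int) := rfl
  unfold pvC1A pvA1 pvHdrsA
  dsimp only
  by_cases hh : PySem.Str.strip line ∈ (["Parameters", "Returns", "Yields", "Raises", "Examples", "Notes", "References"] : List String)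
  · rw [if_pos hh, if_pos hh]
    by_cases heq : (m : Int) + 1 = PySem.List.len L
    · have hnl : ¬ ((m : Int) + 1 < PySem.List.len L) := by rw [hlen] at heq ⊢; omega
      rw [if_neg hnl, if_pos heq]
      simp
    · have hl : (m : Int) + 1 < PySem.List.len L := by rw [hlen] at heq ⊢; omega
      rw [if_pos hl, if_neg heq, if_congr (pvDashOk_iff _) rfl rfl]
      split_ifs <;> simp
  · rw [if_neg hh, if_neg hh]

-- B's pvWalkB, run from index m with the invariant counter value, produces A's contributions
lemma pvWalk_spec (L : List String) (suf : List String) :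
    ∀ (m : Nat), L.drop m = suf →
      pvWalkB L (PySem.List.len L) ((m : Nat) : Int) (pvW L m) suf =
        ((PySem.List.enumerate suf ((m : Nat) : Int)).flatMap (fun p => pvC1A L p ++ pvC2A L p),
         (PySem.List.enumerate suf ((m : Nat) : Int)).flatMap (pvC3A L)) := by
  induction suf with
  | nil => intro m _; simp [pvWalkB, PySem.List.enumerate]
  | cons x xs ih =>
    intro m h
    have hx : L[m]? = some x := by
      have h0 : (List.drop m L)[0]? = L[m + 0]? := List.getElem?_drop
      rw [h] at h0
      simpa using h0.symm
    have hm : m < L.length := by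
      have := List.getElem?_eq_some_iff.1 hx
      exact this.1
    have hget : L.getD m "" = x := by rw [List.getD_eq_getElem?_getD, hx]; rfl
    have hdrop : L.drop (m + 1) = xs := by
      have h1 : List.drop 1 (List.drop m L) = List.drop (m + 1) L := List.drop_drop
      rw [h] at h1
      simpa using h1.symm
    have hcast : ((m : Nat) : Int) + 1 = (((m + 1 : Nat)) : Int) := by push_cast; ring
    have hw' : (if PySem.Str.strip x = "Parameters" then 10 else pvW L m - 1) = pvW L (m + 1) := by
      rw [show pvW L (m + 1) = if PySem.Str.strip (L.getD m "") = "Parameters" then 10 else pvW L m - 1 from rfl, hget]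
    simp only [pvWalkB, hw', hcast, ih (m + 1) hdrop, PySem.List.enumerate_cons, List.flatMap_cons]
    rw [← hcast]
    refine Prod.ext ?_ ?_
    · rw [pvC1_eq L m x hm, pvC2_eq L m x]
    · rw [← pvC3_eq L (((m : Nat) : Int), x)]

theorem pv_main (docstring name : String) :
    check_docstring_format docstring name = check_docstring_format_alt docstring name := by
  by_cases h : docstring = ""
  · simp [check_docstring_format, check_docstring_format_alt, h]
  · unfold check_docstring_format check_docstring_format_alt
    rw [if_neg h, if_neg h]
    dsimp only
    have hwalk := pvWalk_spec ((PySem.Str.split? docstring "\n").getD [])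
      ((PySem.Str.split? docstring "\n").getD []) 0 (by simp)
    rw [show pvW ((PySem.Str.split? docstring "\n").getD []) 0 = 0 from rfl] at hwalk
    simp only [Nat.cast_zero] at hwalk
    rw [hwalk]
    have h12 : (PySem.List.enumerate ((PySem.Str.split? docstring "\n").getD [])).foldl
        (pvStepA12 ((PySem.Str.split? docstring "\n").getD [])) []
        = (PySem.List.enumerate ((PySem.Str.split? docstring "\n").getD [])).flatMap
            (fun p => pvC1A ((PySem.Str.split? docstring "\n").getD []) p ++ pvC2A ((PySem.Str.split? docstring "\n").getD []) p) := by
      rw [PySem.List.foldl_congr_mem _ _ (fun acc x => acc ++ (pvC1A ((PySem.Str.split? docstring "\n").getD []) x ++ pvC2A ((PySem.Str.split? docstring "\n").getD []) x)) []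
        (fun acc x _ => pvStepA12_eq _ acc x)]
      rw [PySem.List.foldl_append_eq_flatMap]
      simp
    have h3 : ∀ (init : List String),
        (PySem.List.enumerate ((PySem.Str.split? docstring "\n").getD [])).foldl
          (pvStepA3 ((PySem.Str.split? docstring "\n").getD [])) init
          = init ++ (PySem.List.enumerate ((PySem.Str.split? docstring "\n").getD [])).flatMap
              (pvC3A ((PySem.Str.split? docstring "\n").getD [])) := by
      intro init
      rw [PySem.List.foldl_congr_mem _ _ (fun acc x => acc ++ pvC3A ((PySem.Str.split? docstring "\n").getD []) x) init
        (fun acc x _ => pvStepA3_eq _ acc x)]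
      exact PySem.List.foldl_append_eq_flatMap _ _ _
    rw [h3, h12]

-- ===== VERDICT (by name: the statement is the Claim_ definition above) =====
theorem check_docstring_format_spec : Claim_equal_check_docstring_format := by
  intro docstring name _
  unfold Spec_check_docstring_format
  exact pv_main docstring name
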